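-- pv_equiv track=rewrite | github.com/mayanks43/reach | preprocess.py | mini_parse_event_rule
-- ===== SOURCE A (Python) =====
-- from collections import defaultdict
--
-- def mini_parse_event_rule(value):
--     sents = value.split("\n")
--     sents = [sent.split('#')[0].strip() for sent in sents]
--     sents = [sent for sent in sents if sent]
--
--     if len(sents) >= 3:
--         args = defaultdict(str)
--         possible_args = set(
--             ["trigger", "controlled:BioEntity", "controller:PossibleController"]
--         )
--         current_arg = ""
--
--         for sent in sents:
--             found = False
--             for arg in possible_args:
--                 if arg + ' = ' in sent:
--                     current_arg = arg
--                     args[current_arg] = sent + "\n"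
--                     found = True
--                     break
--             if not found:
--                 args[current_arg] += sent + "\n"
--
--         trigger = args["trigger"]
--         controlled = args["controlled:BioEntity"]
--         controller = args["controller:PossibleController"]
--         return (trigger, controlled, controller)
--
--     return ('','','')
-- ===== SOURCE B (Python) =====
-- def mini_parse_event_rule(value):
--     lines = []
--     for raw in value.split("\n"):
--         ln = raw.split('#')[0].strip()
--         if ln:
--             lines.append(ln)
--     if len(lines) < 3:
--         return ('', '', '')
--     headers = ["trigger", "controlled:BioEntity", "controller:PossibleController"]
--     blocks = {}
--     pending = []
--     for ln in reversed(lines):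
--         h = next((x for x in headers if x + ' = ' in ln), None)
--         if h is None:
--             pending = [ln] + pending
--         else:
--             if h not in blocks:
--                 blocks[h] = ''.join(s + '\n' for s in [ln] + pending)
--             pending = []
--     return tuple(blocks.get(x, '') for x in headers)
-- ===== Notes on version B (the rewrite author's own statement) =====
-- stated objective: alternative
-- what changed: B replaces A's forward pass with a running current_arg and a defaultdict by a single reverse scan that keeps a pending-suffix list and assigns each header's block first-wins (last occurrence in the text), reading off the three blocks at the end.
import Mathlib
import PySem

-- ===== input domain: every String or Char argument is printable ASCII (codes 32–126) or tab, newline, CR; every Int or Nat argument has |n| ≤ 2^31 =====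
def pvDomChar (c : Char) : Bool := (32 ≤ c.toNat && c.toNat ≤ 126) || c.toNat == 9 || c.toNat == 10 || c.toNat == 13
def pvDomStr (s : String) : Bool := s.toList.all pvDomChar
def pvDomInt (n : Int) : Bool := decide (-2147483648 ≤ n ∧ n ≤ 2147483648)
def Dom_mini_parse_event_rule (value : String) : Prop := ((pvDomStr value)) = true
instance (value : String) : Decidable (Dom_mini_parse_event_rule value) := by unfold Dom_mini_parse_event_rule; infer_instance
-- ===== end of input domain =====

-- B re-parses by a single reverse scan (last header block found first, first-wins) with a pending
-- suffix list, instead of A's forward pass with a running current_arg and a defaultdict; objective: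
-- alternative decomposition, same cost.


-- ===== PORT A =====
-- A's set literal possible_args; PySem.Set.ofList keeps the literal's insertion order.
def pvArgsSetA : PySem.Set String :=
  PySem.Set.ofList ["trigger", "controlled:BioEntity", "controller:PossibleController"]

-- sent.split("#")[0]: a Python split with a nonempty separator never returns none/empty, so .getD []/.headD "" are exact. a Python split with a separator is never empty, so [0] is its head (headD exact).
def pvCleanA (value : String) : List String :=
  ((((PySem.Str.split? value "\n").getD []).map
      (fun sent => PySem.Str.strip (((PySem.Str.split? sent "#").getD []).headD ""))).filter
    (fun sent => sent != ""))

-- the body of A's "for sent in sents" loop: the inner for/break is a first-match search.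
def pvStepA (st : String × PySem.Dict String String) (sent : String) :
    String × PySem.Dict String String :=
  match pvArgsSetA.find? (fun arg => PySem.Str.isIn (arg ++ " = ") sent) with
  | some arg => (arg, st.2.insert arg (sent ++ "\n"))
  | none => (st.1, st.2.insert st.1 (st.2.getD st.1 "" ++ (sent ++ "\n")))

def mini_parse_event_rule (value : String) : String × String × String :=
  let sents := pvCleanA value
  if 3 ≤ sents.length then
    let st := sents.foldl pvStepA ("", PySem.Dict.empty)
    (st.2.getD "trigger" "", st.2.getD "controlled:BioEntity" "",
     st.2.getD "controller:PossibleController" "")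
  else ("", "", "")

-- ===== PORT B =====
def pvHeadersB : List String :=
  ["trigger", "controlled:BioEntity", "controller:PossibleController"]

-- B's cleaning loop (append into lines).
def pvCleanB (value : String) : List String :=
  ((PySem.Str.split? value "\n").getD []).foldl
    (fun acc raw =>
      let ln := PySem.Str.strip (((PySem.Str.split? raw "#").getD []).headD "")
      if ln != "" then acc ++ [ln] else acc) []

def pvHdrOfB (ln : String) : Option String :=
  pvHeadersB.find? (fun x => PySem.Str.isIn (x ++ " = ") ln)

-- the body of B's "for ln in reversed(lines)" loop; state = (blocks, pending).
def pvStepB (st : PySem.Dict String String × List String) (ln : String) :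
    PySem.Dict String String × List String :=
  match pvHdrOfB ln with
  | none => (st.1, ln :: st.2)
  | some h =>
      (if st.1.contains h then st.1
       else st.1.insert h (PySem.Str.join "" ((ln :: st.2).map (fun s => s ++ "\n"))), [])

def mini_parse_event_rule_alt (value : String) : String × String × String :=
  let lines := pvCleanB value
  if lines.length < 3 then ("", "", "")
  else
    let st := lines.reverse.foldl pvStepB (PySem.Dict.empty, [])
    (st.1.getD "trigger" "", st.1.getD "controlled:BioEntity" "",
     st.1.getD "controller:PossibleController" "")

-- ===== PRECONDITION & SPEC =====
-- Pre_ excludes inputs where one raw line contains two DIFFERENT header markers: there A assigns the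
-- line to whichever key Python's hash-ordered set iteration finds first, so A's value is accidental.
def Pre_mini_parse_event_rule (value : String) : Prop :=
  ∀ ln ∈ (PySem.Str.split? value "\n").getD [],
    (["trigger", "controlled:BioEntity", "controller:PossibleController"].filter
      (fun h => PySem.Str.isIn (h ++ " = ") ln)).length ≤ 1
instance (value : String) : Decidable (Pre_mini_parse_event_rule value) := by
  unfold Pre_mini_parse_event_rule; infer_instance

def pvWitness_mini_parse_event_rule : String :=
  "trigger = a\ncontrolled:BioEntity = b # c\n\ncontroller:PossibleController = d\nmore"

def Spec_mini_parse_event_rule (value : String) (out : String × String × String) : Prop :=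
  out = mini_parse_event_rule_alt value
instance (value : String) (out : String × String × String) :
    Decidable (Spec_mini_parse_event_rule value out) := by
  unfold Spec_mini_parse_event_rule; infer_instance

-- ===== CLAIM (what is proved, stated in full; the proofs are below) =====
def Claim_equal_mini_parse_event_rule : Prop :=
  ∀ (value : String), Dom_mini_parse_event_rule value → Pre_mini_parse_event_rule value →
    Spec_mini_parse_event_rule value (mini_parse_event_rule value)

-- ===== LEMMAS AND PROOFS =====

def pvJoinNl (xs : List String) : String := PySem.Str.join "" (xs.map (fun s => s ++ "\n"))

lemma pvFlattenIntersperseNil (L : List (List Char)) :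
    (List.intersperse [] L).flatten = L.flatten := by
  induction L with
  | nil => rfl
  | cons a l ih => cases l <;> simp_all

lemma pvJoinNl_nil : pvJoinNl [] = "" := rfl

lemma pvJoinNl_cons (x : String) (xs : List String) :
    pvJoinNl (x :: xs) = (x ++ "\n") ++ pvJoinNl xs := by
  simp only [pvJoinNl, PySem.Str.join, PySem.Chars.join, List.intercalate, List.map_cons,
    List.map_map, show ("".toList : List Char) = [] from rfl, pvFlattenIntersperseNil,
    List.flatten_cons]
  rw [show ((x ++ "\n").toList : List Char) = x.toList ++ "\n".toList by simp,
    List.append_assoc, String.ofList_append, String.ofList_append, String.ofList_toList,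
    String.ofList_toList, String.append_assoc]

lemma pvArgsSetA_eq : (pvArgsSetA : List String) = pvHeadersB := by decide

lemma pvStepA_eq (st : String × PySem.Dict String String) (sent : String) :
    pvStepA st sent =
      match pvHdrOfB sent with
      | some arg => (arg, st.2.insert arg (sent ++ "\n"))
      | none => (st.1, st.2.insert st.1 (st.2.getD st.1 "" ++ (sent ++ "\n"))) := by
  simp only [pvStepA, pvHdrOfB, pvArgsSetA_eq]

lemma pvClean_eq (value : String) : pvCleanB value = pvCleanA value := by
  unfold pvCleanB pvCleanA
  have := PySem.List.foldl_append_if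
    (fun sent : String => PySem.Str.strip (((PySem.Str.split? sent "#").getD []).headD "") != "")
    (fun sent => PySem.Str.strip (((PySem.Str.split? sent "#").getD []).headD ""))
    ((PySem.Str.split? value "\n").getD []) ([] : List String)
  simpa [List.filter_map, Function.comp_def] using this

-- Main invariant: A's forward fold, started from any (cur, args), is described by B's reverse scan:
-- for a header key k, if the reverse scan found a block for k it is A's final value at k; otherwise
-- no line of l matches k, and A appends exactly the header-free prefix of l (B's final pending) to
-- args[cur].
lemma pvMain (l : List String) (cur : String) (args : PySem.Dict String String)
    (k : String) (hk : k ∈ pvHeadersB) :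
    ((l.foldl pvStepA (cur, args)).2.getD k "" =
      match (l.reverse.foldl pvStepB (PySem.Dict.empty, [])).1.get? k with
      | some b => b
      | none => args.getD k "" ++
          (if cur = k then pvJoinNl (l.reverse.foldl pvStepB (PySem.Dict.empty, [])).2 else "")) := by
  induction l generalizing cur args with
  | nil =>
      simp only [List.foldl_nil, List.reverse_nil, PySem.Dict.get?_empty, pvJoinNl_nil]
      rw [ite_self, String.append_empty]
  | cons ln rest ih =>
      rw [List.foldl_cons, List.reverse_cons, List.foldl_append, List.foldl_cons, List.foldl_nil,
        pvStepA_eq]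
      set stB := rest.reverse.foldl pvStepB (PySem.Dict.empty, []) with hstB
      cases hh : pvHdrOfB ln with
      | none =>
          simp only [pvStepB, hh]
          rw [ih]
          cases hg : stB.1.get? k with
          | some b => rfl
          | none =>
              simp only
              by_cases hck : cur = k
              · subst hck
                rw [if_pos rfl, if_pos rfl, PySem.Dict.getD_insert_self _ _ _ _, pvJoinNl_cons,
                  String.append_assoc, String.append_assoc]
              · rw [if_neg hck, if_neg hck, PySem.Dict.getD_insert_of_ne _ _ _ (Ne.symm hck)]
      | some h =>
          simp only [pvStepB, hh]
          rw [ih]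
          by_cases hc : stB.1.contains h
          · rw [if_pos hc]
            cases hg : stB.1.get? k with
            | some b => rfl
            | none =>
                have hkh : h ≠ k := by
                  intro he; subst he
                  rw [PySem.Dict.contains_eq_isSome_get?, hg] at hc; exact Bool.false_ne_true hc
                simp only
                rw [if_neg hkh, PySem.Dict.getD_insert_of_ne _ _ _ (Ne.symm hkh)]
                simp [pvJoinNl_nil, String.append_empty]
          · rw [if_neg hc]
            by_cases hkh : k = h
            · subst hkh
              have hg : stB.1.get? k = none := by
                rw [PySem.Dict.contains_eq_isSome_get?] at hc
                cases hgg : stB.1.get? k <;> simp [hgg] at hc ⊢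
              rw [PySem.Dict.get?_insert_self, hg]
              simp only [if_pos, PySem.Dict.getD_insert_self _ _ _ _]
              rw [← pvJoinNl_cons]
              rfl
            · rw [PySem.Dict.get?_insert_of_ne _ _ hkh]
              cases hg : stB.1.get? k with
              | some b => rfl
              | none =>
                  simp only
                  rw [if_neg (fun he : h = k => hkh he.symm),
                    PySem.Dict.getD_insert_of_ne _ _ _ hkh]
                  simp [pvJoinNl_nil, String.append_empty]

lemma pvKey_component (sents : List String) (k : String) (hk : k ∈ pvHeadersB)
    (hne : k ≠ "") :
    (sents.foldl pvStepA ("", PySem.Dict.empty)).2.getD k "" =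
      (sents.reverse.foldl pvStepB (PySem.Dict.empty, [])).1.getD k "" := by
  rw [pvMain sents "" PySem.Dict.empty k hk,
    PySem.Dict.getD_eq_get?_getD (sents.reverse.foldl pvStepB (PySem.Dict.empty, [])).1 k ""]
  cases hg : (sents.reverse.foldl pvStepB (PySem.Dict.empty, [])).1.get? k with
  | some b => simp
  | none =>
      simp only [Option.getD_none]
      rw [PySem.Dict.getD_empty, if_neg (fun he => hne he.symm)]
      simp [String.append_empty]

-- ===== VERDICT (by name: the statement is the Claim_ definition above) =====
theorem mini_parse_event_rule_spec : Claim_equal_mini_parse_event_rule := by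
  intro value _ _
  unfold Spec_mini_parse_event_rule mini_parse_event_rule mini_parse_event_rule_alt
  rw [pvClean_eq]
  by_cases h3 : 3 ≤ (pvCleanA value).length
  · rw [if_pos h3, if_neg (by omega)]
    refine congrArg₂ Prod.mk ?_ (congrArg₂ Prod.mk ?_ ?_) <;>
      exact pvKey_component _ _ (by decide) (by decide)
  · rw [if_neg h3, if_pos (by omega)]
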